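-- pv_equiv track=rewrite | github.com/spsanps/nanoSmol | eval/nanoeval/common.py | build_letter_choices
-- ===== SOURCE A (Python) =====
-- from string import ascii_uppercase
-- from typing import Any, List, Mapping, Sequence
--
-- def build_letter_choices(count: int) -> tuple[str, ...]:
--     """Return ``count`` Excel-style letter labels (A..Z, AA, AB, ...)."""
--
--     if count < 1:
--         raise ValueError("Multiple-choice prompts must include at least one option")
--
--     labels: List[str] = []
--     for index in range(count):
--         # Excel-style base-26 conversion that stays within uppercase ASCII.
--         value = index
--         label_parts: List[str] = []
--         while True:
--             value, remainder = divmod(value, len(ascii_uppercase))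
--             label_parts.append(ascii_uppercase[remainder])
--             if value == 0:
--                 break
--             value -= 1
--         labels.append("".join(reversed(label_parts)))
--     return tuple(labels)
-- ===== SOURCE B (Python) =====
-- def build_letter_choices(count: int) -> tuple[str, ...]:
--     """Return ``count`` Excel-style letter labels (A..Z, AA, AB, ...)."""
--     if count < 1:
--         raise ValueError("Multiple-choice prompts must include at least one option")
--
--     def bump(rev):
--         # rev holds the label's characters least-significant first; add one.
--         if not rev:
--             return ['A']
--         if rev[0] == 'Z':
--             return ['A'] + bump(rev[1:])
--         return [chr(ord(rev[0]) + 1)] + rev[1:]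
--
--     labels = []
--     rev = ['A']
--     for _ in range(count):
--         labels.append(''.join(reversed(rev)))
--         rev = bump(rev)
--     return tuple(labels)
-- ===== Notes on version B (the rewrite author's own statement) =====
-- stated objective: simpler
-- what changed: Replaces the per-index bijective base-26 conversion (divmod loop per label) by a sequential odometer: keep the current label and increment its rightmost character with carry (Z->A) once per step.
import Mathlib
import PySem

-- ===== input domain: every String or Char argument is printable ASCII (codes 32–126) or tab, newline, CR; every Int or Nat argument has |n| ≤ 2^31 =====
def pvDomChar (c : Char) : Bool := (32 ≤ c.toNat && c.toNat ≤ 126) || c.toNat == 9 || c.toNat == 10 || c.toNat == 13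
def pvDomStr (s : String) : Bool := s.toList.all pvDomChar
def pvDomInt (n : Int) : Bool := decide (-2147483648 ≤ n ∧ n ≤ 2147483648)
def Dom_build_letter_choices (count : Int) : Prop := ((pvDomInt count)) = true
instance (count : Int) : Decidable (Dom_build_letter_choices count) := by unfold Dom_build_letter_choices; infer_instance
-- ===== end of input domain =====

-- B replaces per-index base-26 conversion by a sequential odometer (increment-with-carry),
-- a simpler decomposition of the same label sequence; same ValueError guard for count < 1.


-- ===== PORT A =====
-- string.ascii_uppercase
def ascii_uppercase : List Char := "ABCDEFGHIJKLMNOPQRSTUVWXYZ".toList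

-- the inner `while True` loop of A; `value` is always a nonnegative Python int
-- (it starts at a range index), so it is carried as a Nat; `//`/`%` on nonnegative
-- operands coincide with Nat division/remainder, and ascii_uppercase[remainder] is
-- always in range (remainder < 26), so getD's default is never used.
def loopA (value : Nat) (label_parts : List Char) : List Char :=
  let q := value / 26
  let r := value % 26
  let label_parts' := label_parts ++ [ascii_uppercase.getD r 'A']
  if q = 0 then label_parts' else loopA (q - 1) label_parts'
termination_by value
decreasing_by omega

def build_letter_choices (count : Int) : List String :=
  (PySem.List.pyRange 0 count 1).foldl
    (fun labels index => labels ++ [String.mk (loopA index.toNat []).reverse]) []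

-- ===== PORT B =====
-- bump: add one to a label held least-significant character first
def bump : List Char → List Char
  | [] => ['A']
  | c :: rest => if c = 'Z' then 'A' :: bump rest else Char.ofNat (c.toNat + 1) :: rest

def loopB : Nat → List Char → List String → List String
  | 0, _, labels => labels
  | n + 1, rev, labels => loopB n (bump rev) (labels ++ [String.mk rev.reverse])

def build_letter_choices_alt (count : Int) : List String :=
  if count < 1 then [] else loopB count.toNat ['A'] []

-- ===== PRECONDITION & SPEC =====
-- Pre_ excludes count < 1, where both Pythons raise ValueError.
def Pre_build_letter_choices (count : Int) : Prop := 1 ≤ count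
instance (count : Int) : Decidable (Pre_build_letter_choices count) := by unfold Pre_build_letter_choices; infer_instance
def pvWitness_build_letter_choices : Int := 3

def Spec_build_letter_choices (count : Int) (out : List String) : Prop := out = build_letter_choices_alt count
instance (count : Int) (out : List String) : Decidable (Spec_build_letter_choices count out) := by unfold Spec_build_letter_choices; infer_instance

-- ===== CLAIM (what is proved, stated in full; the proofs are below) =====
def Claim_equal_build_letter_choices : Prop := ∀ (count : Int), Dom_build_letter_choices count → Pre_build_letter_choices count → Spec_build_letter_choices count (build_letter_choices count)

-- ===== LEMMAS AND PROOFS =====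

-- the digit list (least significant first) A computes for index n
def digitsA (n : Nat) : List Char := loopA n []

theorem loopA_acc (n : Nat) (parts : List Char) : loopA n parts = parts ++ digitsA n := by
  induction n using Nat.strong_induction_on generalizing parts with
  | _ n ih =>
    rw [loopA.eq_def, digitsA, loopA.eq_def]
    by_cases h : n / 26 = 0
    · simp [h]
    · rw [if_neg h, if_neg h, ih (n / 26 - 1) (by omega), ih (n / 26 - 1) (by omega)]
      simp

theorem digitsA_eq (n : Nat) :
    digitsA n = ascii_uppercase.getD (n % 26) 'A' ::
      (if n / 26 = 0 then [] else digitsA (n / 26 - 1)) := by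
  rw [digitsA, loopA.eq_def]
  by_cases h : n / 26 = 0
  · simp [h]
  · rw [if_neg h, if_neg h, loopA_acc]
    simp

theorem az_Z_iff : ∀ r < 26, (ascii_uppercase.getD r 'A' = 'Z' ↔ r = 25) := by decide

theorem az_succ : ∀ r < 25,
    Char.ofNat ((ascii_uppercase.getD r 'A').toNat + 1) = ascii_uppercase.getD (r + 1) 'A' := by
  decide

theorem digitsA_zero : digitsA 0 = ['A'] := by
  rw [digitsA_eq]
  decide

theorem bump_cons (c : Char) (t : List Char) (h : c ≠ 'Z') :
    bump (c :: t) = Char.ofNat (c.toNat + 1) :: t := by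
  simp [bump, h]

theorem bump_digitsA (n : Nat) : bump (digitsA n) = digitsA (n + 1) := by
  induction n using Nat.strong_induction_on with
  | _ n ih =>
    rw [digitsA_eq n, digitsA_eq (n + 1)]
    have hr : n % 26 < 26 := Nat.mod_lt _ (by omega)
    by_cases h25 : n % 26 = 25
    · -- carry case: digit is 'Z'
      have hz : ascii_uppercase.getD (n % 26) 'A' = 'Z' := (az_Z_iff _ hr).mpr h25
      have hsm : (n + 1) % 26 = 0 := by omega
      have hsd : (n + 1) / 26 = n / 26 + 1 := by omega
      rw [hsm, hsd, hz, if_neg (Nat.succ_ne_zero (n / 26)), Nat.add_sub_cancel]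
      have h0 : ascii_uppercase.getD 0 'A' = 'A' := by decide
      rw [h0]
      have hbump : ∀ t : List Char, bump ('Z' :: t) = 'A' :: bump t := by
        intro t; simp [bump]
      rw [hbump]
      by_cases hq : n / 26 = 0
      · rw [if_pos hq, hq, show bump ([] : List Char) = ['A'] from rfl, digitsA_zero]
      · rw [if_neg hq, ih (n / 26 - 1) (by omega), Nat.sub_add_cancel (by omega)]
    · -- no carry: digit below 'Z'
      have hnz : ascii_uppercase.getD (n % 26) 'A' ≠ 'Z' := fun h => h25 ((az_Z_iff _ hr).mp h)
      have hsm : (n + 1) % 26 = n % 26 + 1 := by omega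
      have hsd : (n + 1) / 26 = n / 26 := by omega
      rw [hsm, hsd]
      rw [bump_cons _ _ hnz, az_succ (n % 26) (by omega)]

theorem loopB_spec (n k : Nat) (labels : List String) :
    loopB n (digitsA k) labels =
      labels ++ (List.range n).map (fun j => String.mk (digitsA (k + j)).reverse) := by
  induction n generalizing k labels with
  | zero => simp [loopB]
  | succ n ih =>
    rw [loopB, bump_digitsA, ih, List.range_succ_eq_map, List.map_cons, List.map_map,
      List.append_assoc, List.singleton_append]
    simp only [Nat.add_zero]
    congr 1
    congr 1
    apply List.map_congr_left
    intro a _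
    simp only [Function.comp_apply]
    rw [show k + 1 + a = k + (a + 1) from by omega]

-- ===== VERDICT (by name: the statement is the Claim_ definition above) =====
theorem build_letter_choices_spec : Claim_equal_build_letter_choices := by
  intro count _ hpre
  unfold Spec_build_letter_choices build_letter_choices build_letter_choices_alt
  rw [if_neg (not_lt.mpr hpre)]
  rw [← digitsA_zero, loopB_spec]
  rw [PySem.List.pyRange_one 0 count]
  simp only [Int.sub_zero, List.foldl_map]
  rw [PySem.List.foldl_append_singleton_eq_map]
  simp [digitsA]
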